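-- pv_equiv track=rewrite | github.com/kahuku/competitive_programming | kattis/ordinals.py | recurse
-- ===== SOURCE A (Python) =====
-- def recurse(n):
--     if n == 0: return '{}'
--     s = '{'
--     for i in range(n):
--         s += recurse(i)
--         if i != n - 1: s += ','
--     s += '}'
--     return s
-- ===== SOURCE B (Python) =====
-- def recurse(n):
--     if n <= 0:
--         return '{}'
--     inner = ''
--     for k in range(n):
--         cur = '{' + inner + '}'          # equals recurse(k): reuse the already-built join
--         inner = inner + (',' if k != 0 else '') + cur
--     return '{' + inner + '}'
-- ===== Notes on version B (the rewrite author's own statement) =====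
-- stated objective: faster
-- what changed: Replaces the exponential tree of recursive calls with a single bottom-up loop that keeps the comma-joined string of all previous ordinals and derives each new ordinal from it, so every substring is built once.
import Mathlib
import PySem

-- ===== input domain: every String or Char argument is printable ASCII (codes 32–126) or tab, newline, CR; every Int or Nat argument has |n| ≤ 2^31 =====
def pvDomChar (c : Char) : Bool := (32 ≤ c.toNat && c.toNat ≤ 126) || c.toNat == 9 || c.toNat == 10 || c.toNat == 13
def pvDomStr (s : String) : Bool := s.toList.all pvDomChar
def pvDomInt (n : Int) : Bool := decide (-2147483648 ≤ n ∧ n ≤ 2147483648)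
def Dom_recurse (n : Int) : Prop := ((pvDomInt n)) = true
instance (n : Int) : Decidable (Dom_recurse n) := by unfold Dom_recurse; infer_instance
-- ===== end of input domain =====

-- B replaces A's exponential recursion by one bottom-up loop that reuses the joined string of
-- all previous ordinals, building every substring once (objective: faster, asymptotically).

-- ===== PORT A =====
def recurse (n : Int) : String :=
  if n == 0 then "{}"
  else
    ((PySem.List.pyRange 0 n 1).attach.foldl
      (fun s x => s ++ recurse x.1 ++ (if x.1 ≠ n - 1 then "," else "")) "{") ++ "}"
termination_by n.toNat
decreasing_by
  have h := (PySem.List.mem_pyRange_one).mp x.2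
  omega

-- ===== PORT B =====
def recurse_alt (n : Int) : String :=
  if n ≤ 0 then "{}"
  else
    "{" ++ ((List.range n.toNat).foldl
      (fun inner k => inner ++ (if k ≠ 0 then "," else "") ++ ("{" ++ inner ++ "}")) "") ++ "}"

-- ===== PRECONDITION & SPEC =====
def Spec_recurse (n : Int) (out : String) : Prop := out = recurse_alt n
instance (n : Int) (out : String) : Decidable (Spec_recurse n out) := by unfold Spec_recurse; infer_instance

-- ===== CLAIM (what is proved, stated in full; the proofs are below) =====
def Claim_equal_recurse : Prop := ∀ (n : Int), Dom_recurse n → Spec_recurse n (recurse n)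

-- ===== LEMMAS AND PROOFS =====

-- J m = the comma-join of the ordinal strings for 0..m-1 (B's loop invariant)
def Jstr : Nat → String
  | 0 => ""
  | (k+1) => Jstr k ++ (if k ≠ 0 then "," else "") ++ ("{" ++ Jstr k ++ "}")

-- B's fold computes Jstr
theorem alt_fold (m : Nat) :
    (List.range m).foldl
      (fun inner k => inner ++ (if k ≠ 0 then "," else "") ++ ("{" ++ inner ++ "}")) "" = Jstr m := by
  induction m with
  | zero => rfl
  | succ m ih => rw [List.range_succ, List.foldl_append, ih]; rfl

-- fold of the comma-always step
theorem foldC (m : Nat) (x : String) :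
    (List.range m).foldl (fun s k => s ++ ("{" ++ Jstr k ++ "}") ++ ",") x
      = x ++ Jstr m ++ (if m = 0 then "" else ",") := by
  induction m generalizing x with
  | zero => simp [Jstr]
  | succ m ih =>
    rw [List.range_succ, List.foldl_append, ih]
    simp only [List.foldl_cons, List.foldl_nil]
    cases m <;> simp [Jstr, String.append_assoc]

-- A's fold (comma after every element except the last) equals "{" ++ Jstr (m+1)
theorem foldA (m : Nat) :
    (List.range (m+1)).foldl
      (fun s k => s ++ ("{" ++ Jstr k ++ "}") ++ (if k ≠ m then "," else "")) "{"
      = "{" ++ Jstr (m+1) := by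
  rw [List.range_succ, List.foldl_append]
  have h := PySem.List.foldl_congr_mem
    (l := List.range m) (init := ("{" : String))
    (f := fun s k => s ++ ("{" ++ Jstr k ++ "}") ++ (if k ≠ m then "," else ""))
    (g := fun s k => s ++ ("{" ++ Jstr k ++ "}") ++ ",")
    (by intro acc k hk
        have hk' : k < m := List.mem_range.mp hk
        simp [Nat.ne_of_lt hk'])
  rw [h, foldC]
  simp only [List.foldl_cons, List.foldl_nil]
  cases m <;> simp [Jstr, String.append_assoc]

-- the two characters, concatenated, form the literal "{}"
theorem brace_empty : ("{" : String) ++ "" ++ "}" = "{}" := by decide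

-- A computes "{" ++ Jstr n.toNat ++ "}" for every n
theorem recurse_eq_J (n : Int) : recurse n = "{" ++ Jstr n.toNat ++ "}" := by
  by_cases hn : 0 < n
  · have hkey : ∀ m : Nat, ∀ n : Int, n.toNat = m → 0 < n →
        recurse n = "{" ++ Jstr n.toNat ++ "}" := by
      intro m
      induction m using Nat.strong_induction_on with
      | _ m ih =>
        intro n hm hn
        rw [recurse]
        have h0 : ¬ (n == 0) = true := by simp; omega
        rw [if_neg h0]
        rw [List.foldl_attach
          (f := fun s i => s ++ recurse i ++ (if i ≠ n - 1 then "," else ""))]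
        rw [PySem.List.pyRange_one 0 n, List.foldl_map]
        have hsub : Int.toNat (n - 0) = n.toNat := by omega
        rw [hsub]
        obtain ⟨m', hm'⟩ : ∃ m', n.toNat = m' + 1 := ⟨n.toNat - 1, by omega⟩
        rw [hm']
        have h := PySem.List.foldl_congr_mem
          (l := List.range (m' + 1)) (init := ("{" : String))
          (f := fun s k => s ++ recurse (0 + (k : Int)) ++ (if (0 + (k : Int)) ≠ n - 1 then "," else ""))
          (g := fun s k => s ++ ("{" ++ Jstr k ++ "}") ++ (if k ≠ m' then "," else ""))
          (by intro acc k hk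
              dsimp only
              have hklt : k < m' + 1 := List.mem_range.mp hk
              have h1 : recurse (0 + (k : Int)) = "{" ++ Jstr k ++ "}" := by
                rcases Nat.eq_zero_or_pos k with hk0 | hkpos
                · subst hk0
                  rw [recurse]
                  rw [if_pos (by simp)]
                  simp [Jstr, brace_empty.symm]
                · have := ih k (by omega) ((k : Int)) (by omega) (by omega)
                  simpa using this
              rw [h1]
              have h2 : ((0 + (k : Int)) ≠ n - 1) = (k ≠ m') := by
                simp only [eq_iff_iff]
                constructor <;> intro h <;> omega
              simp only [h2])
        rw [h, foldA]
    exact hkey n.toNat n rfl hn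
  · rw [recurse]
    have ht : n.toNat = 0 := by omega
    rw [ht]
    by_cases h0 : n = 0
    · rw [if_pos (by simp [h0])]
      simp [Jstr, brace_empty.symm]
    · rw [if_neg (by simpa using h0)]
      rw [PySem.List.pyRange_one_eq_nil (by omega)]
      simp [Jstr]

-- B computes the same
theorem recurse_alt_eq_J (n : Int) : recurse_alt n = "{" ++ Jstr n.toNat ++ "}" := by
  rw [recurse_alt]
  by_cases hn : n ≤ 0
  · have ht : n.toNat = 0 := by omega
    rw [if_pos hn, ht]
    simp [Jstr, brace_empty.symm]
  · rw [if_neg hn, alt_fold]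

-- ===== VERDICT (by name: the statement is the Claim_ definition above) =====
theorem recurse_spec : Claim_equal_recurse := by
  intro n _
  unfold Spec_recurse
  rw [recurse_eq_J, recurse_alt_eq_J]
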